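-- pv_equiv track=rewrite | github.com/saran-gangster/chatter_research | src/chatter_twin/rl.py | _count_joined
-- ===== SOURCE A (Python) =====
-- def _count_joined(values) -> str:
--     counts: dict[str, int] = {}
--     for value in values:
--         for item in str(value).split(";"):
--             item = item.strip()
--             if item:
--                 counts[item] = counts.get(item, 0) + 1
--     return ";".join(f"{key}:{counts[key]}" for key in sorted(counts))
-- ===== SOURCE B (Python) =====
-- def _count_joined(values) -> str:
--     items = sorted(
--         item
--         for value in values
--         for item in map(str.strip, str(value).split(";"))
--         if item
--     )
--     parts = []
--     i, n = 0, len(items)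
--     while i < n:
--         j = i
--         while j < n and items[j] == items[i]:
--             j += 1
--         parts.append((items[i], j - i))
--         i = j
--     return ";".join(f"{k}:{c}" for k, c in parts)
-- ===== Notes on version B (the rewrite author's own statement) =====
-- stated objective: alternative
-- what changed: Replaces the counting dict with a flatten-sort-then-scan-runs strategy: all stripped non-empty items are collected into one list, sorted, and consecutive equal runs are counted in a single scan.
import Mathlib
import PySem

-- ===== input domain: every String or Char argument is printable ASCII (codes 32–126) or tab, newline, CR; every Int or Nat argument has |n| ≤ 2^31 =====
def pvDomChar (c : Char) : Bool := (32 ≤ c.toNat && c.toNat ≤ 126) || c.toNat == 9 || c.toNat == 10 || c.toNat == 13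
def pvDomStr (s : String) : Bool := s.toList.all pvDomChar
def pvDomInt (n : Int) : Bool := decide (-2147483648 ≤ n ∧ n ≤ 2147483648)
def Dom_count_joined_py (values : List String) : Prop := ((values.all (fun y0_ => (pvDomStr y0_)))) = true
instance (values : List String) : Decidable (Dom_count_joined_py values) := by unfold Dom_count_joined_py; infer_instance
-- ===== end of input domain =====

-- B replaces A's counting dict with flatten + sort + one scan counting equal runs (objective: alternative).

-- ===== PORT A =====
-- dict-counting loop, then sorted keys joined as "key:count"
def count_joined_py (values : List String) : String :=
  let counts : PySem.Dict String Int :=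
    values.foldl (fun d value =>
      (((PySem.Str.split? value ";").getD [])).foldl (fun d item =>
        let item := PySem.Str.strip item
        if item ≠ "" then d.insert item (d.getD item 0 + 1) else d) d)
      PySem.Dict.empty
  -- counts[key]: key always comes from counts' own keys, so get? is some; .getD 0 only totalises
  PySem.Str.join ";"
    ((PySem.List.sorted counts.keys (fun k => k) false).map
      (fun key => key ++ ":" ++ PySem.Int.toStr ((counts.get? key).getD 0)))

-- ===== PORT B =====
-- the two while-loops of Source B: count the leading run of equal items, continue after it
def pvRuns (l : List String) : List (String × Int) :=
  match l with
  | [] => []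
  | x :: xs =>
      (x, 1 + ((xs.takeWhile (· == x)).length : Int)) :: pvRuns (xs.dropWhile (· == x))
termination_by l.length
decreasing_by
  simp only [List.length_cons]
  exact Nat.lt_succ_of_le (List.length_dropWhile_le _ _)

def count_joined_py_alt (values : List String) : String :=
  let items := PySem.List.sorted
    (values.flatMap (fun value =>
      ((((PySem.Str.split? value ";").getD [])).map PySem.Str.strip).filter (fun i => i ≠ "")))
    (fun x => x) false
  PySem.Str.join ";" ((pvRuns items).map (fun p => p.1 ++ ":" ++ PySem.Int.toStr p.2))

-- ===== PRECONDITION & SPEC =====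
def Spec_count_joined_py (values : List String) (out : String) : Prop := out = count_joined_py_alt values
instance (values : List String) (out : String) : Decidable (Spec_count_joined_py values out) := by unfold Spec_count_joined_py; infer_instance

-- ===== CLAIM (what is proved, stated in full; the proofs are below) =====
def Claim_equal_count_joined_py : Prop := ∀ (values : List String), Dom_count_joined_py values → Spec_count_joined_py values (count_joined_py values)

-- ===== LEMMAS AND PROOFS =====

-- the flat list of stripped, non-empty items (shared shape of both ports)
def pvItems (values : List String) : List String :=
  values.flatMap (fun value =>
    ((((PySem.Str.split? value ";").getD [])).map PySem.Str.strip).filter (fun i => i ≠ ""))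

-- A's guarded inner loop is the plain insert-fold over the filtered stripped items
theorem fold_if_eq (ls : List String) (d : PySem.Dict String Int) :
    ls.foldl (fun d item =>
        let item := PySem.Str.strip item
        if item ≠ "" then d.insert item (d.getD item 0 + 1) else d) d
      = ((ls.map PySem.Str.strip).filter (fun i => i ≠ "")).foldl
          (fun d item => d.insert item (d.getD item 0 + 1)) d := by
  induction ls generalizing d with
  | nil => rfl
  | cons x xs ih =>
      rw [List.foldl_cons, List.map_cons, List.filter_cons]
      by_cases h : PySem.Str.strip x = ""
      · show xs.foldl _ (if PySem.Str.strip x ≠ "" then _ else d) = _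
        rw [if_neg (by simpa using h), if_neg (by simpa using h)]
        exact ih d
      · show xs.foldl _ (if PySem.Str.strip x ≠ "" then _ else _) = _
        rw [if_pos h, if_pos (by simpa using h), List.foldl_cons]
        exact ih _

-- folding value-by-value equals folding the flattened list
theorem foldl_flatMap_eq {α β γ : Type} (g : α → List β) (upd : γ → β → γ)
    (l : List α) (d0 : γ) :
    l.foldl (fun d v => (g v).foldl upd d) d0 = (l.flatMap g).foldl upd d0 := by
  induction l generalizing d0 with
  | nil => rfl
  | cons x xs ih => simp [List.flatMap_cons, List.foldl_append, ih]

-- A's dict is Counter(pvItems values)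
theorem counts_eq_counter (values : List String) :
    (values.foldl (fun d value =>
      (((PySem.Str.split? value ";").getD [])).foldl (fun d item =>
        let item := PySem.Str.strip item
        if item ≠ "" then d.insert item (d.getD item 0 + 1) else d) d)
      (PySem.Dict.empty : PySem.Dict String Int)) = PySem.Dict.counter (pvItems values) := by
  have h1 : ∀ (d : PySem.Dict String Int) (value : String),
      (((PySem.Str.split? value ";").getD [])).foldl (fun d item =>
        let item := PySem.Str.strip item
        if item ≠ "" then d.insert item (d.getD item 0 + 1) else d) d
      = (((((PySem.Str.split? value ";").getD [])).map PySem.Str.strip).filter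
          (fun i => i ≠ "")).foldl (fun d item => d.insert item (d.getD item 0 + 1)) d :=
    fun d value => fold_if_eq _ d
  calc values.foldl _ PySem.Dict.empty
      = values.foldl (fun d value =>
          (((((PySem.Str.split? value ";").getD [])).map PySem.Str.strip).filter
            (fun i => i ≠ "")).foldl (fun d item => d.insert item (d.getD item 0 + 1)) d)
          (PySem.Dict.empty : PySem.Dict String Int) := by
        exact PySem.List.foldl_congr_mem values _ _ _ (fun d v _ => h1 d v)
    _ = (pvItems values).foldl (fun d item => d.insert item (d.getD item 0 + 1))
          (PySem.Dict.empty : PySem.Dict String Int) := foldl_flatMap_eq _ _ _ _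
    _ = PySem.Dict.counter (pvItems values) :=
        PySem.Dict.foldl_insert_getD_add_one_eq_counter _

theorem count_flatMap_replicate (cnt : String → Nat) (a : String) (L : List String)
    (hnd : L.Nodup) :
    (L.flatMap (fun k => List.replicate (cnt k) k)).count a = if a ∈ L then cnt a else 0 := by
  induction L with
  | nil => simp
  | cons k L ih =>
      simp only [List.flatMap_cons, List.count_append, List.count_replicate]
      rcases List.nodup_cons.mp hnd with ⟨hk, hnd'⟩
      by_cases h : a = k
      · subst h; simp [ih hnd', hk]
      · simp [Ne.symm h, h, ih hnd']

theorem pairwise_le_flatMap_replicate (cnt : String → Nat) (L : List String)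
    (hlt : L.Pairwise (· < ·)) :
    (L.flatMap (fun k => List.replicate (cnt k) k)).Pairwise (· ≤ ·) := by
  induction L with
  | nil => simp
  | cons k L ih =>
      rcases List.pairwise_cons.mp hlt with ⟨hk, hL⟩
      rw [List.flatMap_cons, List.pairwise_append]
      refine ⟨List.pairwise_replicate.mpr (by simp), ih hL, ?_⟩
      intro a ha b hb
      rw [List.eq_of_mem_replicate ha]
      obtain ⟨k', hk', hb'⟩ := List.mem_flatMap.mp hb
      rw [List.eq_of_mem_replicate hb']
      exact le_of_lt (hk k' hk')

-- the sorted item list decomposes into runs over the sorted distinct keys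
theorem sorted_eq_flatMap (items : List String) :
    PySem.List.sorted items (fun x => x) false
      = (PySem.List.sorted (PySem.Set.ofList items) (fun x => x) false).flatMap
          (fun k => List.replicate (items.count k) k) := by
  set L := PySem.List.sorted (PySem.Set.ofList items) (fun x => x) false with hL
  have hlt : L.Pairwise (· < ·) := PySem.List.sorted_ofList_pairwise_lt items
  have hnd : L.Nodup := hlt.nodup
  have hmem : ∀ a, a ∈ L ↔ a ∈ items := by
    intro a
    rw [hL, PySem.List.mem_sorted, PySem.Set.mem_ofList]
  have hperm : (L.flatMap (fun k => List.replicate (items.count k) k)).Perm items := by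
    rw [List.perm_iff_count]
    intro a
    rw [count_flatMap_replicate _ a L hnd]
    by_cases h : a ∈ items
    · simp [(hmem a).mpr h]
    · simp [List.count_eq_zero_of_not_mem h]
  exact PySem.List.sorted_id_eq_of_perm_of_pairwise _ _ hperm
    (pairwise_le_flatMap_replicate _ L hlt)

theorem takeWhile_rep (k : String) (m : Nat) (R : List String)
    (hR : ∀ a ∈ R, a ≠ k) :
    (List.replicate m k ++ R).takeWhile (· == k) = List.replicate m k := by
  induction m with
  | zero =>
      simp only [List.replicate_zero, List.nil_append]
      cases R with
      | nil => rfl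
      | cons r R' =>
          rw [List.takeWhile_cons_of_neg]
          simp [hR r (by simp)]
  | succ n ih =>
      rw [List.replicate_succ, List.cons_append, List.takeWhile_cons_of_pos (by simp), ih]

theorem dropWhile_rep (k : String) (m : Nat) (R : List String)
    (hR : ∀ a ∈ R, a ≠ k) :
    (List.replicate m k ++ R).dropWhile (· == k) = R := by
  induction m with
  | zero =>
      simp only [List.replicate_zero, List.nil_append]
      cases R with
      | nil => rfl
      | cons r R' =>
          rw [List.dropWhile_cons_of_neg]
          simp [hR r (by simp)]
  | succ n ih =>
      rw [List.replicate_succ, List.cons_append, List.dropWhile_cons_of_pos (by simp), ih]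

-- B's run scan over the decomposed sorted list yields exactly (key, count) per distinct key
theorem runs_flatMap (cnt : String → Nat) (L : List String)
    (hlt : L.Pairwise (· < ·)) (hpos : ∀ k ∈ L, 0 < cnt k) :
    pvRuns (L.flatMap (fun k => List.replicate (cnt k) k))
      = L.map (fun k => (k, (cnt k : Int))) := by
  induction L with
  | nil => simp [pvRuns]
  | cons k L ih =>
      rcases List.pairwise_cons.mp hlt with ⟨hk, hL⟩
      obtain ⟨m, hm⟩ : ∃ m, cnt k = m + 1 :=
        ⟨cnt k - 1, by have := hpos k (by simp); omega⟩
      have hR : ∀ a ∈ L.flatMap (fun k => List.replicate (cnt k) k), a ≠ k := by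
        intro a ha
        obtain ⟨k', hk', ha'⟩ := List.mem_flatMap.mp ha
        rw [List.eq_of_mem_replicate ha']
        exact ne_of_gt (hk k' hk')
      rw [List.flatMap_cons, hm, List.replicate_succ, List.cons_append, List.map_cons]
      rw [pvRuns]
      rw [takeWhile_rep k m _ hR, dropWhile_rep k m _ hR,
        ih hL (fun k' h' => hpos k' (by simp [h']))]
      simp [hm]
      ring

-- ===== VERDICT (by name: the statement is the Claim_ definition above) =====
theorem count_joined_py_spec : Claim_equal_count_joined_py := by
  intro values _
  show count_joined_py values = count_joined_py_alt values
  unfold count_joined_py count_joined_py_alt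
  simp only [counts_eq_counter values]
  set items := pvItems values with hitems
  have hflat : values.flatMap (fun value =>
      ((((PySem.Str.split? value ";").getD [])).map PySem.Str.strip).filter (fun i => i ≠ ""))
      = items := rfl
  simp only [hflat, PySem.Dict.keys_counter, sorted_eq_flatMap items]
  set L := PySem.List.sorted (PySem.Set.ofList items) (fun x => x) false with hL
  have hlt : L.Pairwise (· < ·) := PySem.List.sorted_ofList_pairwise_lt items
  have hmem : ∀ a, a ∈ L ↔ a ∈ items := by
    intro a
    rw [hL, PySem.List.mem_sorted, PySem.Set.mem_ofList]
  rw [runs_flatMap (fun k => items.count k) L hlt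
    (fun k hkL => List.count_pos_iff.mpr ((hmem k).mp hkL))]
  rw [List.map_map]
  refine congrArg _ (List.map_congr_left ?_)
  intro key hkey
  have hget : ((PySem.Dict.counter items).get? key).getD 0 = (items.count key : Int) := by
    have := PySem.Dict.getD_counter (xs := items) (v := key)
    simpa [PySem.Dict.getD] using this
  simp [hget]
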